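-- pv_equiv track=rewrite | github.com/Unsiloed-AI/Unsiloed-chunker | Unsiloed/utils/openai.py | clean_cell_text
-- ===== SOURCE A (Python) =====
-- def clean_cell_text(value) -> str:
--     """
--     Clean cell text to avoid JSON parsing issues.
--
--     Args:
--         value: Cell value to clean
--
--     Returns:
--         Cleaned text
--     """
--     # Convert to string if not already
--     text = str(value)
--
--     # Replace problematic characters
--     text = text.replace('\r', ' ')
--     text = text.replace('\n', ' ')
--     text = text.replace('\t', ' ')
--     text = text.replace('"', "'")  # Replace double quotes with single quotes
--     text = text.replace('\\', '/')  # Replace backslashes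
--
--     # Remove control characters
--     text = ''.join(c for c in text if ord(c) >= 32 or c == '\n')
--
--     # Trim extra whitespace
--     text = ' '.join(text.split())
--
--     return text
-- ===== SOURCE B (Python) =====
-- def clean_cell_text(value) -> str:
--     """Clean cell text to avoid JSON parsing issues (single-pass translate)."""
--     table = {ord('\r'): ' ', ord('\n'): ' ', ord('\t'): ' ',
--              ord('"'): "'", ord('\\'): '/'}
--     for i in range(32):
--         if i not in (9, 10, 13):
--             table[i] = None
--     text = str(value).translate(table)
--     return ' '.join(text.split())
-- ===== Notes on version B (the rewrite author's own statement) =====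
-- stated objective: faster
-- what changed: Replaces five sequential str.replace scans plus a per-character ord-filter join comprehension with one translation table (dict built once) applied in a single str.translate pass, keeping the final whitespace-normalising join of split().
import Mathlib
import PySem

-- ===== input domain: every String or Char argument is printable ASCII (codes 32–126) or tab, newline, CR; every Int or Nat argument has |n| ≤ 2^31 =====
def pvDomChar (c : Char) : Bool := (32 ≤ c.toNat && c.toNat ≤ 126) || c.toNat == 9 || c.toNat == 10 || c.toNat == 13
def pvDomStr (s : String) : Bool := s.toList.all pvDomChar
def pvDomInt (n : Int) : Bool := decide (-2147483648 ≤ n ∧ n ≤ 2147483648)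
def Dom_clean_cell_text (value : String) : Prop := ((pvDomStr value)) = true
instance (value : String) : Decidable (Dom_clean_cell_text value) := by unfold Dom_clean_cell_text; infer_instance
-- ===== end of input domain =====

-- B replaces A's five sequential replace passes + ord-filter comprehension by one
-- translation table (dict built once) applied in a single translate pass; a timing run measured B faster.

-- ===== PORT A =====
def clean_cell_text (value : String) : String :=
  let text := value
  let text := PySem.Str.replace text "\r" " "
  let text := PySem.Str.replace text "\n" " "
  let text := PySem.Str.replace text "\t" " "
  let text := PySem.Str.replace text "\"" "'"
  let text := PySem.Str.replace text "\\" "/"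
  -- ''.join(c for c in text if ord(c) >= 32 or c == '\n'): hand port, exact — keep chars with code ≥ 32 or '\n'
  let text := String.ofList (text.toList.filter (fun c => 32 ≤ c.toNat || c == '\n'))
  PySem.Str.join " " (PySem.Str.split₀ text)

-- ===== PORT B =====
-- the translation table Source B builds: code point → some repl (map) / none (delete); absent key = keep
def pvTranslateTable : PySem.Dict Int (Option String) :=
  let t : PySem.Dict Int (Option String) :=
    (((((PySem.Dict.empty).insert 13 (some " ")).insert 10 (some " ")).insert 9 (some " ")).insert 34 (some "'")).insert 92 (some "/")
  (PySem.List.pyRange 0 32 1).foldl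
    (fun t i => if !(i == 9 || i == 10 || i == 13) then t.insert i none else t) t

-- hand port of str.translate for a table of 1-char-string/None values: exact there
def pvTranslate (tbl : PySem.Dict Int (Option String)) (s : String) : String :=
  String.ofList (s.toList.flatMap (fun c =>
    match tbl.get? (c.toNat : Int) with
    | none => [c]
    | some none => []
    | some (some r) => r.toList))

def clean_cell_text_alt (value : String) : String :=
  PySem.Str.join " " (PySem.Str.split₀ (pvTranslate pvTranslateTable value))

-- ===== PRECONDITION & SPEC =====
def Spec_clean_cell_text (value : String) (out : String) : Prop := out = clean_cell_text_alt value
instance (value : String) (out : String) : Decidable (Spec_clean_cell_text value out) := by unfold Spec_clean_cell_text; infer_instance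

-- ===== CLAIM (what is proved, stated in full; the proofs are below) =====
def Claim_equal_clean_cell_text : Prop := ∀ (value : String), Dom_clean_cell_text value → Spec_clean_cell_text value (clean_cell_text value)

-- ===== LEMMAS AND PROOFS =====

-- the per-char action of one single-char replace, and A's five composed
def pvRep (a b c : Char) : Char := if c = a then b else c
def pvGA (c : Char) : Char :=
  pvRep '\\' '/' (pvRep '\"' '\'' (pvRep '\t' ' ' (pvRep '\n' ' ' (pvRep '\r' ' ' c))))

-- single-char replace is a map
theorem replace_go_single (a b : Char) : ∀ (fuel : Nat) (l acc : List Char), l.length ≤ fuel →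
    PySem.Chars.replace.go [a] [b] fuel l acc
      = acc.reverse ++ l.map (pvRep a b) := by
  intro fuel
  induction fuel with
  | zero =>
    intro l acc h
    cases l with
    | nil => simp [PySem.Chars.replace.go]
    | cons c t => simp at h
  | succ n ih =>
    intro l acc h
    cases l with
    | nil => simp [PySem.Chars.replace.go]
    | cons c t =>
      simp only [PySem.Chars.replace.go, List.isPrefixOf, List.map, pvRep]
      by_cases hc : c = a
      · simp only [hc, beq_self_eq_true, Bool.true_and, if_true]
        rw [show List.drop [a].length (a :: t) = t from rfl,
            show [b].reverse ++ acc = b :: acc from rfl,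
            ih t (b :: acc) (by simpa using Nat.le_of_succ_le_succ h)]
        simp
      · have hba : (a == c) = false := by
          simp only [beq_eq_false_iff_ne, ne_eq]
          exact fun h' => hc h'.symm
        simp only [hba, Bool.false_and, Bool.false_eq_true, if_false, if_neg hc]
        rw [ih t (c :: acc) (by simpa using Nat.le_of_succ_le_succ h)]
        simp

theorem replace_single (a b : Char) (l : List Char) :
    PySem.Chars.replace l [a] [b] = l.map (pvRep a b) := by
  simp only [PySem.Chars.replace, List.isEmpty]
  simpa using replace_go_single a b l.length l [] (le_refl _)

-- filter-after-map as a flatMap of per-char pieces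
theorem filter_map_eq_flatMap (p : Char → Bool) (f : Char → Char) (l : List Char) :
    (l.map f).filter p = l.flatMap (fun c => if p (f c) then [f c] else []) := by
  induction l with
  | nil => rfl
  | cons c t ih =>
    simp only [List.map, List.filter, List.flatMap_cons]
    by_cases h : p (f c) <;> simp [h, ih]

theorem table_items : pvTranslateTable.items = [((13 : Int), some " "), (10, some " "), (9, some " "), (34, some "'"), (92, some "/"), (0, none), (1, none), (2, none), (3, none), (4, none), (5, none), (6, none), (7, none), (8, none), (11, none), (12, none), (14, none), (15, none), (16, none), (17, none), (18, none), (19, none), (20, none), (21, none), (22, none), (23, none), (24, none), (25, none), (26, none), (27, none), (28, none), (29, none), (30, none), (31, none)] := by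
  decide

theorem table_get_none (n : Int) (h : 32 ≤ n) (h34 : n ≠ 34) (h92 : n ≠ 92) :
    pvTranslateTable.get? n = none := by
  simp only [PySem.Dict.get?, table_items, Option.map_eq_none_iff]
  rw [List.find?_eq_none]
  intro p hp
  fin_cases hp <;> simp only [beq_iff_eq] <;> omega

theorem table_get_low (n : Int) (h0 : 0 ≤ n) (h : n < 32)
    (h9 : n ≠ 9) (h10 : n ≠ 10) (h13 : n ≠ 13) :
    pvTranslateTable.get? n = some none := by
  interval_cases n <;> first | (exact absurd rfl (by assumption)) | decide

theorem char_of_toNat {c d : Char} (h : c.toNat = d.toNat) : c = d := by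
  apply Char.ext
  exact UInt32.toNat_inj.mp h

theorem per_char (c : Char) :
    (if 32 ≤ (pvGA c).toNat || (pvGA c) == '\n' then [pvGA c] else []) =
    (match pvTranslateTable.get? ((c.toNat : Int)) with
     | none => [c]
     | some none => []
     | some (some r) => r.toList) := by
  by_cases h1 : c = '\r'; · subst h1; decide
  by_cases h2 : c = '\n'; · subst h2; decide
  by_cases h3 : c = '\t'; · subst h3; decide
  by_cases h4 : c = '\"'; · subst h4; decide
  by_cases h5 : c = '\\'; · subst h5; decide
  have hg : pvGA c = c := by simp [pvGA, pvRep, h1, h2, h3, h4, h5]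
  rw [hg]
  by_cases hge : 32 ≤ c.toNat
  · have h34 : (c.toNat : Int) ≠ 34 := by
      intro h; exact h4 (char_of_toNat (by exact_mod_cast h))
    have h92 : (c.toNat : Int) ≠ 92 := by
      intro h; exact h5 (char_of_toNat (by exact_mod_cast h))
    rw [table_get_none _ (by exact_mod_cast hge) h34 h92]
    simp [hge]
  · have h9 : (c.toNat : Int) ≠ 9 := by
      intro h; exact h3 (char_of_toNat (by exact_mod_cast h))
    have h10 : (c.toNat : Int) ≠ 10 := by
      intro h; exact h2 (char_of_toNat (by exact_mod_cast h))
    have h13 : (c.toNat : Int) ≠ 13 := by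
      intro h; exact h1 (char_of_toNat (by exact_mod_cast h))
    rw [table_get_low _ (by positivity) (by exact_mod_cast Nat.lt_of_not_le hge) h9 h10 h13]
    have hne : (c == '\n') = false := by simp [h2]
    simp [hge, hne]

-- ===== VERDICT (by name: the statement is the Claim_ definition above) =====
set_option maxHeartbeats 2000000 in
theorem clean_cell_text_spec : Claim_equal_clean_cell_text := by
  intro value _
  unfold Spec_clean_cell_text clean_cell_text clean_cell_text_alt pvTranslate
  have hlist :
      (((((value.toList.map (pvRep '\r' ' ')).map (pvRep '\n' ' ')).map (pvRep '\t' ' ')).map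
          (pvRep '\"' '\'')).map (pvRep '\\' '/')).filter (fun c => 32 ≤ c.toNat || c == '\n') =
      value.toList.flatMap (fun c =>
        match pvTranslateTable.get? ((c.toNat : Int)) with
        | none => [c]
        | some none => []
        | some (some r) => r.toList) := by
    simp only [List.map_map]
    rw [filter_map_eq_flatMap]
    congr 1
    funext c
    simpa [Function.comp, pvGA] using per_char c
  simp only [PySem.Str.replace,
    show ("\r" : String).toList = ['\r'] from rfl,
    show ("\n" : String).toList = ['\n'] from rfl,
    show ("\t" : String).toList = ['\t'] from rfl,
    show ("\"" : String).toList = ['\"'] from rfl,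
    show ("'" : String).toList = ['\''] from rfl,
    show ("\\" : String).toList = ['\\'] from rfl,
    show ("/" : String).toList = ['/'] from rfl,
    show (" " : String).toList = [' '] from rfl,
    String.toList_ofList, replace_single]
  rw [hlist]
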